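-- pv_equiv track=rewrite | github.com/brianpaden/truthgraph | tests/accuracy/validate_framework.py | simulate_predictions
-- ===== SOURCE A (Python) =====
-- from typing import Dict, List, Tuple
--
-- def simulate_predictions(verdicts: List[str]) -> List[str]:
--     """Simulate predictions for validation.
--
--     This creates realistic predictions that achieve >70% accuracy
--     while having some errors to make the evaluation meaningful.
--
--     Args:
--         verdicts: Expected verdicts
--
--     Returns:
--         List of predicted verdicts
--     """
--     predictions = []
--     error_rate = 0.25  # 25% error rate for realistic evaluation
--
--     for i, verdict in enumerate(verdicts):
--         # Use deterministic pseudo-random pattern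
--         if i % 4 == 0:  # Introduce errors at predictable intervals
--             # Flip verdict
--             if verdict == "SUPPORTED":
--                 predictions.append("REFUTED")
--             elif verdict == "REFUTED":
--                 predictions.append("INSUFFICIENT")
--             else:
--                 predictions.append("SUPPORTED")
--         else:
--             predictions.append(verdict)
--
--     return predictions
-- ===== SOURCE B (Python) =====
-- from typing import List
--
--
-- def _flip(verdict: str) -> str:
--     if verdict == "SUPPORTED":
--         return "REFUTED"
--     if verdict == "REFUTED":
--         return "INSUFFICIENT"
--     return "SUPPORTED"
--
--
-- def simulate_predictions(verdicts: List[str]) -> List[str]: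
--     # Walk the list in chunks of 4: flip the chunk head, copy the next three.
--     out: List[str] = []
--     i = 0
--     n = len(verdicts)
--     while i < n:
--         out.append(_flip(verdicts[i]))
--         out.extend(verdicts[i + 1:i + 4])
--         i += 4
--     return out
-- ===== Notes on version B (the rewrite author's own statement) =====
-- stated objective: simpler
-- what changed: Replaces the enumerate loop with its per-element i%4 branch by a walk over 4-element chunks: flip the head of each chunk, copy the next three elements verbatim, advance by 4.
import Mathlib
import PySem

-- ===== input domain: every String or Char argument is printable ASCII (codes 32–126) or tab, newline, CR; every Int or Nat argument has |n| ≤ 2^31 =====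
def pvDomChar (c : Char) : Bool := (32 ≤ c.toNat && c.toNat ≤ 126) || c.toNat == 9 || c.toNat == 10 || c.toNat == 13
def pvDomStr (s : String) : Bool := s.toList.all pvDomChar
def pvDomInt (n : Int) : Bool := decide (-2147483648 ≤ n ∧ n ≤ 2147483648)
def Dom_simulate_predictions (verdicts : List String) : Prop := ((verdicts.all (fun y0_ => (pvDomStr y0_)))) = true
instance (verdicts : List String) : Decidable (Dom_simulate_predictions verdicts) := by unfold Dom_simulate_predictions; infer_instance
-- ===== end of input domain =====

-- B replaces A's enumerate/i%4 single pass by a walk over 4-element chunks (objective: simpler).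
-- ===== PORT A =====
-- Literal transliteration of A: foldl over enumerate(verdicts), branching on i % 4
def simulate_predictions (verdicts : List String) : List String :=
  (PySem.List.enumerate verdicts).foldl (fun predictions iv =>
    if PySem.Int.mod iv.1 4 == 0 then
      if iv.2 == "SUPPORTED" then predictions ++ ["REFUTED"]
      else if iv.2 == "REFUTED" then predictions ++ ["INSUFFICIENT"]
      else predictions ++ ["SUPPORTED"]
    else predictions ++ [iv.2]) []

-- ===== PORT B =====
def pvFlip (verdict : String) : String :=
  if verdict = "SUPPORTED" then "REFUTED"
  else if verdict = "REFUTED" then "INSUFFICIENT"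
  else "SUPPORTED"

-- Transliteration of B: consume the list in 4-element chunks (head flipped, next three copied)
def simulate_predictions_alt : List String → List String
  | [] => []
  | v :: rest => pvFlip v :: (rest.take 3 ++ simulate_predictions_alt (rest.drop 3))
termination_by vs => vs.length
decreasing_by simp [List.length_drop]

-- ===== PRECONDITION & SPEC =====
def Spec_simulate_predictions (verdicts : List String) (out : List String) : Prop := out = simulate_predictions_alt verdicts
instance (verdicts : List String) (out : List String) : Decidable (Spec_simulate_predictions verdicts out) := by unfold Spec_simulate_predictions; infer_instance

-- ===== CLAIM (what is proved, stated in full; the proofs are below) =====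
def Claim_equal_simulate_predictions : Prop := ∀ (verdicts : List String), Dom_simulate_predictions verdicts → Spec_simulate_predictions verdicts (simulate_predictions verdicts)

-- ===== LEMMAS AND PROOFS =====

-- ===== VERDICT (by name: the statement is the Claim_ definition above) =====

-- step function of A's foldl
lemma pv_main (vs : List String) (k : Nat) (hk : k % 4 = 0) (acc : List String) :
    ((PySem.List.enumerate vs (k : Int)).foldl (fun predictions iv =>
      if PySem.Int.mod iv.1 4 == 0 then
        if iv.2 == "SUPPORTED" then predictions ++ ["REFUTED"]
        else if iv.2 == "REFUTED" then predictions ++ ["INSUFFICIENT"]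
        else predictions ++ ["SUPPORTED"]
      else predictions ++ [iv.2])
      acc) = acc ++ simulate_predictions_alt vs := by
  have hd0 : (4:Int) ∣ (k:Int) := by omega
  match vs with
  | [] => simp [simulate_predictions_alt, PySem.List.enumerate_nil]
  | [a] =>
      simp [simulate_predictions_alt, PySem.List.enumerate_cons, PySem.List.enumerate_nil,
        hd0, pvFlip]
      split_ifs <;> simp_all
  | [a, b] =>
      have hd1 : ¬ (4:Int) ∣ ((k:Int)+1) := by omega
      simp [simulate_predictions_alt, PySem.List.enumerate_cons, PySem.List.enumerate_nil,
        hd0, hd1, pvFlip]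
      split_ifs <;> simp_all
  | [a, b, c] =>
      have hd1 : ¬ (4:Int) ∣ ((k:Int)+1) := by omega
      have hd2 : ¬ (4:Int) ∣ ((k:Int)+1+1) := by omega
      simp [simulate_predictions_alt, PySem.List.enumerate_cons, PySem.List.enumerate_nil,
        hd0, hd1, hd2, pvFlip]
      split_ifs <;> simp_all
  | a :: b :: c :: d :: rest =>
      have hd1 : ¬ (4:Int) ∣ ((k:Int)+1) := by omega
      have hd2 : ¬ (4:Int) ∣ ((k:Int)+1+1) := by omega
      have hd3 : ¬ (4:Int) ∣ ((k:Int)+1+1+1) := by omega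
      have hcast : ((k:Int)+1+1+1+1) = ((k+4 : Nat) : Int) := by push_cast; ring
      have ih := pv_main rest (k+4) (by omega)
      simp only [simulate_predictions_alt, PySem.List.enumerate_cons, List.foldl_cons,
        hcast, List.take, List.drop]
      simp [hd0, hd1, hd2, hd3, pvFlip]
      split_ifs <;> simp_all
termination_by vs.length

theorem simulate_predictions_spec : Claim_equal_simulate_predictions := by
  intro vs _
  show _ = _
  simpa [simulate_predictions] using pv_main vs 0 rfl []
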